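-- pv_equiv track=rewrite | github.com/apeace/governor | util.py | list_minus
-- ===== SOURCE A (Python) =====
-- from typing import Dict, Optional, List, Set, Tuple
--
-- def list_minus(list1: List[int], list2: List[int]):
--     """
--     Subtracts list2 from list1. Example:
--
--         list_minus([1, 1, 1], [1]) ==> [1, 1]
--     """
--     new_list1 = list1[:]
--     new_list1_inprog = []
--     while len(list2) > 0:
--         remove = list2[0]
--         removed = False
--         list2 = list2[1:]
--         for x in new_list1:
--             if not removed and x == remove:
--                 removed = True
--                 continue
--             new_list1_inprog.append(x)
--         new_list1 = new_list1_inprog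
--         new_list1_inprog = []
--     return new_list1
-- ===== SOURCE B (Python) =====
-- def list_minus(list1, list2):
--     """
--     Subtracts list2 from list1. Example:
--
--         list_minus([1, 1, 1], [1]) ==> [1, 1]
--     """
--     counts = {}
--     for x in list2:
--         counts[x] = counts.get(x, 0) + 1
--     out = []
--     for x in list1:
--         c = counts.get(x, 0)
--         if c > 0:
--             counts[x] = c - 1
--         else:
--             out.append(x)
--     return out
-- ===== Notes on version B (the rewrite author's own statement) =====
-- stated objective: faster
-- what changed: A rebuilds list1 once per element of list2 with a removed-flag pass; B builds a count dict of list2 once and does a single pass over list1, skipping each element while its remaining count is positive.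
import Mathlib
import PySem

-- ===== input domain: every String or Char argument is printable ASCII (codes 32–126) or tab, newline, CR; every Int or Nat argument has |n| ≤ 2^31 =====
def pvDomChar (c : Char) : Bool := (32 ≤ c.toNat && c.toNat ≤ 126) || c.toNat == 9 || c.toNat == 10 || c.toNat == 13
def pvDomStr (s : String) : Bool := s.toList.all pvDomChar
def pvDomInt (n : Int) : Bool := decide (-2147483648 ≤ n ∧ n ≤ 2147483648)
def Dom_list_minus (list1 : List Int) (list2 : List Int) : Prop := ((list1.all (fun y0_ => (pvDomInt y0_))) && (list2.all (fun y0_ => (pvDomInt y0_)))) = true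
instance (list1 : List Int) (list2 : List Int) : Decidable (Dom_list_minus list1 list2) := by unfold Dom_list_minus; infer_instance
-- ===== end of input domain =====

-- B replaces A's repeated full-list rebuild per removal with a one-pass count dict (asymptotically faster).


-- ===== PORT A =====
-- while len(list2) > 0: pop the head, then one pass over new_list1 skipping the first match
def lmLoop : List Int → List Int → List Int
  | new_list1, [] => new_list1
  | new_list1, remove :: rest =>
      lmLoop ((new_list1.foldl
        (fun (s : Bool × List Int) x =>
          if !s.1 && x == remove then (true, s.2) else (s.1, s.2 ++ [x]))
        (false, []))).2 rest

def list_minus (list1 : List Int) (list2 : List Int) : List Int :=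
  lmLoop list1 list2

-- ===== PORT B =====
def list_minus_alt (list1 : List Int) (list2 : List Int) : List Int :=
  let counts := list2.foldl (fun d x => d.insert x (d.getD x 0 + 1)) (PySem.Dict.empty : PySem.Dict Int Int)
  (list1.foldl
    (fun (s : PySem.Dict Int Int × List Int) x =>
      let c := s.1.getD x 0
      if c > 0 then (s.1.insert x (c - 1), s.2) else (s.1, s.2 ++ [x]))
    (counts, ([] : List Int))).2

-- ===== PRECONDITION & SPEC =====
def Spec_list_minus (list1 : List Int) (list2 : List Int) (out : List Int) : Prop := out = list_minus_alt list1 list2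
instance (list1 : List Int) (list2 : List Int) (out : List Int) : Decidable (Spec_list_minus list1 list2 out) := by unfold Spec_list_minus; infer_instance

-- ===== CLAIM (what is proved, stated in full; the proofs are below) =====
def Claim_equal_list_minus : Prop := ∀ (list1 : List Int) (list2 : List Int), Dom_list_minus list1 list2 → Spec_list_minus list1 list2 (list_minus list1 list2)

-- ===== LEMMAS AND PROOFS =====

-- A's inner pass once `removed` is set: everything is appended
lemma lmInner_true (r : Int) (nl acc : List Int) :
    nl.foldl (fun (s : Bool × List Int) x =>
        if !s.1 && x == r then (true, s.2) else (s.1, s.2 ++ [x])) (true, acc)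
      = (true, acc ++ nl) := by
  induction nl generalizing acc with
  | nil => simp
  | cons a as ih =>
    rw [List.foldl_cons, if_neg (by simp)]
    rw [ih]
    simp

-- A's inner pass from `removed = False` computes acc ++ nl.erase r
lemma lmInner_false (r : Int) (nl acc : List Int) :
    (nl.foldl (fun (s : Bool × List Int) x =>
        if !s.1 && x == r then (true, s.2) else (s.1, s.2 ++ [x])) (false, acc)).2
      = acc ++ nl.erase r := by
  induction nl generalizing acc with
  | nil => simp
  | cons a as ih =>
    by_cases h : a = r
    · rw [List.foldl_cons, if_pos (by simp [h]), lmInner_true, List.erase_cons]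
      simp [h]
    · rw [List.foldl_cons, if_neg (by simp [h]), ih, List.erase_cons]
      simp [h]

-- A is foldl erase over list2
lemma lmLoop_eq_foldl_erase (nl l2 : List Int) :
    lmLoop nl l2 = l2.foldl (fun acc r => acc.erase r) nl := by
  induction l2 generalizing nl with
  | nil => rfl
  | cons r rest ih =>
    rw [lmLoop, lmInner_false, ih]
    simp

-- abstract one-pass skipper with a count function
def lmPass (c : Int → Int) : List Int → List Int
  | [] => []
  | x :: xs =>
      if c x > 0 then lmPass (fun y => if y = x then c x - 1 else c y) xs
      else x :: lmPass c xs

lemma lmPass_zero (l : List Int) : lmPass (fun _ => 0) l = l := by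
  induction l with
  | nil => rfl
  | cons a as ih => simp [lmPass, ih]

-- incrementing the count at r is the same as erasing the first r beforehand
lemma lmPass_incr (c : Int → Int) (r : Int) (l : List Int) (hc : 0 ≤ c r) :
    lmPass (fun y => if y = r then c r + 1 else c y) l = lmPass c (l.erase r) := by
  induction l generalizing c with
  | nil => simp [lmPass]
  | cons x xs ih =>
    by_cases hxr : x = r
    · subst hxr
      have hpos : (0 : Int) < c x + 1 := by omega
      simp only [List.erase_cons_head, lmPass, if_true]
      rw [if_pos hpos]
      have hfun : (fun y => if y = x then (c x + 1) - 1 else if y = x then c x + 1 else c y) = c := by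
        funext y; by_cases hy : y = x <;> simp [hy]
      rw [hfun]
    · have herase : (x :: xs).erase r = x :: xs.erase r := by
        simp [hxr]
      rw [herase]
      simp only [lmPass]
      rw [if_neg hxr]
      split_ifs with hcx
      · have hrx : ¬ r = x := fun h => hxr h.symm
        have ihx := ih (fun z => if z = x then c x - 1 else c z) (by simpa [hrx] using hc)
        beta_reduce at ihx
        rw [if_neg hrx] at ihx
        have hswap : (fun y => if y = x then c x - 1 else if y = r then c r + 1 else c y)
            = fun y => if y = r then c r + 1 else if y = x then c x - 1 else c y := by
          funext y
          by_cases hy : y = x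
          · simp [hy, hxr]
          · by_cases hyr : y = r <;> simp [hy, hyr, hrx]
        rw [hswap]
        exact ihx
      · rw [ih _ hc]

-- B's fold over list1 is lmPass of the dict's count function
lemma lmFold_eq_lmPass (d : PySem.Dict Int Int) (acc l : List Int) :
    (l.foldl
      (fun (s : PySem.Dict Int Int × List Int) x =>
        let c := s.1.getD x 0
        if c > 0 then (s.1.insert x (c - 1), s.2) else (s.1, s.2 ++ [x]))
      (d, acc)).2 = acc ++ lmPass (fun y => d.getD y 0) l := by
  induction l generalizing d acc with
  | nil => simp [lmPass]
  | cons x xs ih =>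
    by_cases h : d.getD x 0 > 0
    · simp only [List.foldl_cons, lmPass, h, if_pos]
      rw [ih]
      congr 2
      funext y
      rw [PySem.Dict.getD_insert]
    · simp [List.foldl_cons, lmPass, h, ih]

lemma lmPass_count (l1 l2 : List Int) :
    lmPass (fun y => (l2.count y : Int)) l1 = l2.foldl (fun acc r => acc.erase r) l1 := by
  induction l2 generalizing l1 with
  | nil => simpa using lmPass_zero l1
  | cons r rest ih =>
    have hfun : (fun y => ((r :: rest).count y : Int))
        = fun y => if y = r then (rest.count r : Int) + 1 else (rest.count y : Int) := by
      funext y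
      by_cases hy : y = r
      · simp [hy]
      · have hry : ¬ r = y := fun h => hy h.symm
        simp [hy, hry]
    have h1 := lmPass_incr (fun y => (rest.count y : Int)) r l1 (by simp)
    beta_reduce at h1
    rw [hfun, h1, List.foldl_cons, ih]

-- ===== VERDICT (by name: the statement is the Claim_ definition above) =====
theorem list_minus_spec : Claim_equal_list_minus := by
  intro l1 l2 _
  show list_minus l1 l2 = list_minus_alt l1 l2
  rw [list_minus, lmLoop_eq_foldl_erase, list_minus_alt]
  rw [lmFold_eq_lmPass]
  have hcount : ∀ y, (l2.foldl (fun d x => d.insert x (d.getD x 0 + 1))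
      (PySem.Dict.empty : PySem.Dict Int Int)).getD y 0 = (l2.count y : Int) := by
    intro y
    rw [PySem.Dict.getD_foldl_insert_add_one]
    simp
  have : (fun y => (l2.foldl (fun d x => d.insert x (d.getD x 0 + 1))
      (PySem.Dict.empty : PySem.Dict Int Int)).getD y 0) = fun y => (l2.count y : Int) := by
    funext y; exact hcount y
  rw [this, lmPass_count]
  simp
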